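-- pv_equiv track=rewrite | github.com/Explorer001/adventofcode | 2018/day7/main.py | get_src_index
-- ===== SOURCE A (Python) =====
-- def get_src_index(adj_mat):
--     l = len(adj_mat)
--     src = True
--     for i in range(l):
--         src = True
--         for j in range(l):
--             if adj_mat[j][i] != 0:
--                 src= False
--                 break
--         if src:
--             return i
--     return -1
-- ===== SOURCE B (Python) =====
-- def get_src_index(adj_mat):
--     l = len(adj_mat)
--     has_incoming = [False] * l
--     for j in range(l):
--         for i in range(l):
--             if adj_mat[j][i] != 0:
--                 has_incoming[i] = True
--     for i in range(l):
--         if not has_incoming[i]: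
--             return i
--     return -1
-- ===== Notes on version B (the rewrite author's own statement) =====
-- stated objective: alternative
-- what changed: B first builds a has_incoming boolean table with a full row-major double pass, then scans it for the first index without incoming edges, instead of A's interleaved column-by-column scan with early break.
-- outside the precondition, e.g. on get_src_index([[0, 5], [1]]): A returns -1, B raises IndexError
import Mathlib
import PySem

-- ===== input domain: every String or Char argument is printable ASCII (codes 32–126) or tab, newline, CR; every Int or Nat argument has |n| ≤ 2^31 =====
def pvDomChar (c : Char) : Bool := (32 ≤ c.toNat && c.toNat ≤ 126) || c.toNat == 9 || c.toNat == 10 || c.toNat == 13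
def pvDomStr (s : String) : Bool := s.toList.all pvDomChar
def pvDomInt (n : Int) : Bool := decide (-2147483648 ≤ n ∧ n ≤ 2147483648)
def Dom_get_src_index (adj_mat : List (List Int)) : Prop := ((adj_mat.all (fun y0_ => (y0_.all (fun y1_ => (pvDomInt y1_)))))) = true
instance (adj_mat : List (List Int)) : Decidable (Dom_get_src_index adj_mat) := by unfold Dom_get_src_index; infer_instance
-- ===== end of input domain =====

-- B replaces A's interleaved column scan with early break by a two-phase pass: build a
-- has_incoming table over the whole l×l matrix, then scan it for the first source (alternative decomposition).

-- ===== PORT A =====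
-- adj_mat[j][i]; in-range under Pre_ (default never reached there)
def pvEntry (adj : List (List Int)) (j i : Nat) : Int := (adj.getD j []).getD i 0

-- inner 'for j' loop of A: src stays True unless some entry in column i is nonzero (break)
def pvInnerA (adj : List (List Int)) (i : Nat) : List Nat → Bool
  | [] => true
  | j :: rest => if pvEntry adj j i ≠ 0 then false else pvInnerA adj i rest

-- outer 'for i' loop of A with its early return
def pvOuterA (adj : List (List Int)) (l : Nat) : List Nat → Int
  | [] => -1
  | i :: rest => if pvInnerA adj i (List.range l) then (i : Int) else pvOuterA adj l rest

def get_src_index (adj_mat : List (List Int)) : Int :=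
  pvOuterA adj_mat adj_mat.length (List.range adj_mat.length)

-- ===== PORT B =====
-- phase 1 of B: fill the has_incoming table, row-major, no early exit
def pvBuild (adj : List (List Int)) (l : Nat) : List Bool :=
  (List.range l).foldl
    (fun h j => (List.range l).foldl
      (fun h i => if pvEntry adj j i ≠ 0 then h.set i true else h) h)
    (List.replicate l false)

-- phase 2 of B: first index with no incoming edge
def pvScanB (has : List Bool) : List Nat → Int
  | [] => -1
  | i :: rest => if has.getD i false then pvScanB has rest else (i : Int)

def get_src_index_alt (adj_mat : List (List Int)) : Int :=
  let l := adj_mat.length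
  pvScanB (pvBuild adj_mat l) (List.range l)

-- ===== PRECONDITION & SPEC =====
-- Pre_ excludes ragged matrices (some row shorter than len(adj_mat)): there the Python
-- programs can hit IndexError — and A's early break can return where B's full table pass raises.
def Pre_get_src_index (adj_mat : List (List Int)) : Prop :=
  ∀ row ∈ adj_mat, adj_mat.length ≤ row.length
instance (adj_mat : List (List Int)) : Decidable (Pre_get_src_index adj_mat) := by unfold Pre_get_src_index; infer_instance
def pvWitness_get_src_index : List (List Int) := [[0, 1], [0, 0]]

def Spec_get_src_index (adj_mat : List (List Int)) (out : Int) : Prop := out = get_src_index_alt adj_mat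
instance (adj_mat : List (List Int)) (out : Int) : Decidable (Spec_get_src_index adj_mat out) := by unfold Spec_get_src_index; infer_instance

-- ===== CLAIM =====
def Claim_equal_get_src_index : Prop := ∀ (adj_mat : List (List Int)), Dom_get_src_index adj_mat → Pre_get_src_index adj_mat → Spec_get_src_index adj_mat (get_src_index adj_mat)

-- ===== LEMMAS AND PROOFS =====

-- A's inner loop decides "column i is all zero along js"
theorem pvInnerA_eq (adj : List (List Int)) (i : Nat) (js : List Nat) :
    pvInnerA adj i js = decide (∀ j ∈ js, pvEntry adj j i = 0) := by
  induction js with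
  | nil => simp [pvInnerA]
  | cons j rest ih =>
    by_cases h : pvEntry adj j i = 0 <;> simp [pvInnerA, h, ih]

theorem pvSet_getD (h : List Bool) (i k : Nat) (b : Bool) :
    (h.set i b).getD k false = if k = i ∧ i < h.length then b else h.getD k false := by
  split_ifs with hc
  · obtain ⟨rfl, hlt⟩ := hc
    simp [List.getD, hlt]
  · by_cases hne : k = i
    · subst hne
      simp only [List.getD, List.getElem?_set]
      have : ¬ k < h.length := fun hl => hc ⟨rfl, hl⟩
      simp [this]
    · simp [List.getD, Ne.symm hne]

-- inner foldl of B over one row j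
theorem pvRow_length (adj : List (List Int)) (j : Nat) (is : List Nat) (h : List Bool) :
    (is.foldl (fun h i => if pvEntry adj j i ≠ 0 then h.set i true else h) h).length = h.length := by
  induction is generalizing h with
  | nil => rfl
  | cons i rest ih =>
    rw [List.foldl_cons]
    split_ifs with hi
    · rw [ih, List.length_set]
    · exact ih h

theorem pvRow_getD (adj : List (List Int)) (j : Nat) (is : List Nat) (h : List Bool)
    (k : Nat) (hk : k < h.length) :
    (is.foldl (fun h i => if pvEntry adj j i ≠ 0 then h.set i true else h) h).getD k false
      = (h.getD k false || (decide (k ∈ is) && decide (pvEntry adj j k ≠ 0))) := by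
  induction is generalizing h with
  | nil => simp
  | cons i rest ih =>
    simp only [List.foldl_cons]
    by_cases hi : pvEntry adj j i ≠ 0
    · rw [if_pos hi, ih _ (by simpa [List.length_set] using hk), pvSet_getD]
      by_cases hki : k = i
      · subst hki; simp [hk, hi]
      · simp [hki, List.mem_cons]
    · rw [if_neg hi, ih _ hk]
      by_cases hki : k = i
      · subst hki; simp [not_not.mp hi]
      · simp [hki, List.mem_cons]

theorem pvOuter_getD (adj : List (List Int)) (l : Nat) (js : List Nat) (h : List Bool)
    (hl : h.length = l) (k : Nat) (hk : k < l) :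
    (js.foldl (fun h j => (List.range l).foldl
      (fun h i => if pvEntry adj j i ≠ 0 then h.set i true else h) h) h).getD k false
      = (h.getD k false || decide (∃ j ∈ js, pvEntry adj j k ≠ 0)) := by
  induction js generalizing h with
  | nil => simp
  | cons j rest ih =>
    simp only [List.foldl_cons]
    rw [ih _ (by rw [pvRow_length, hl]), pvRow_getD adj j _ h k (hl ▸ hk)]
    simp [List.mem_range, hk, Bool.or_assoc]

theorem pvBuild_getD (adj : List (List Int)) (l k : Nat) (hk : k < l) :
    (pvBuild adj l).getD k false = decide (∃ j ∈ List.range l, pvEntry adj j k ≠ 0) := by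
  unfold pvBuild
  rw [pvOuter_getD adj l _ _ (List.length_replicate) k hk]
  simp [List.getD, hk]

theorem pvScan_eq (adj : List (List Int)) (l : Nat) (is : List Nat) (his : ∀ i ∈ is, i < l) :
    pvScanB (pvBuild adj l) is = pvOuterA adj l is := by
  induction is with
  | nil => rfl
  | cons i rest ih =>
    have hi : i < l := his i (List.mem_cons_self ..)
    simp only [pvScanB, pvOuterA]
    rw [pvBuild_getD adj l i hi, pvInnerA_eq]
    simp only [decide_eq_true_eq]
    by_cases h : ∀ j ∈ List.range l, pvEntry adj j i = 0
    · rw [if_neg (by rintro ⟨j, hj, hne⟩; exact hne (h j hj)),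
          if_pos h]
    · have h2 : ∃ j ∈ List.range l, pvEntry adj j i ≠ 0 := by push Not at h; exact h
      obtain ⟨j, hj, hne⟩ := h2
      rw [if_pos ⟨j, hj, hne⟩, if_neg h]
      exact ih (fun i hi => his i (List.mem_cons_of_mem _ hi))

-- ===== VERDICT =====
theorem get_src_index_spec : Claim_equal_get_src_index := by
  intro adj _ _
  unfold Spec_get_src_index get_src_index get_src_index_alt
  exact (pvScan_eq adj adj.length (List.range adj.length) (fun i hi => List.mem_range.mp hi)).symm
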